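-- pv_equiv track=rewrite | github.com/pedrojunqueira/world_cup_qatar_2022_simulator | wc_simulator.py | round_16_populate
-- ===== SOURCE A (Python) =====
-- def round_16_populate(fixture,group_stage_results):
--     for result in group_stage_results:
--         current_group, through_teams = result
--         for game, match in fixture.items():
--             for team in match.keys():
--                 team_group, position = team[0], int(team[1])
--                 if team_group == current_group:
--                     fixture[game][f"{team_group}{position}"] = through_teams[position - 1]
--     return fixture
-- ===== SOURCE B (Python) =====
-- def round_16_populate(fixture, group_stage_results):
--     # Build a group -> through_teams index once (last occurrence wins, as in A),
--     # then fill every fixture in a single pass.  Mutates fixture in place like A.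
--     index = {}
--     for group, through_teams in group_stage_results:
--         index[group] = through_teams
--     for game, match in fixture.items():
--         for team in list(match):
--             group = team[0]
--             if group in index:
--                 position = int(team[1])
--                 match[f"{group}{position}"] = index[group][position - 1]
--     return fixture
-- ===== Notes on version B (the rewrite author's own statement) =====
-- stated objective: faster
-- what changed: A re-scans every fixture for every group-stage result (a pass per result); B builds a group->through_teams dict once (last occurrence wins, as in A) and fills all fixtures in a single pass over fixture.items(), parsing the position only for teams whose group is in the index.
-- outside the precondition, e.g. on round_16_populate({'g1': {'': 'tbd'}}, []): A returns {'g1': {'': 'tbd'}}, B raises IndexError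
import Mathlib
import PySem

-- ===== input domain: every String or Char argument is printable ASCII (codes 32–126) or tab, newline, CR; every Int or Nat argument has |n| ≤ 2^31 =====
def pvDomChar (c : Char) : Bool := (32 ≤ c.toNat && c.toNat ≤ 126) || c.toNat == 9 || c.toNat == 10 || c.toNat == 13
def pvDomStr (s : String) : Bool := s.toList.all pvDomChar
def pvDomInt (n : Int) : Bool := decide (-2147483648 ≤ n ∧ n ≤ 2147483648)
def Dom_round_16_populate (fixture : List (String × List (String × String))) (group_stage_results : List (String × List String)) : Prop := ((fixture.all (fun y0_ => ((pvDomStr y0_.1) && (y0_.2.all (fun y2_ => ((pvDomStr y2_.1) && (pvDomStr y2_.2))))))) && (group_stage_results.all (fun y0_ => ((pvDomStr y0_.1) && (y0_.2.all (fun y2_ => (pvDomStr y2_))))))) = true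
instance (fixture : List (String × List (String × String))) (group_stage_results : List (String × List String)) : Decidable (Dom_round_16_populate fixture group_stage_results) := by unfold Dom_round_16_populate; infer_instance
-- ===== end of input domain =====

-- B builds a group→through_teams index once and fills every fixture in ONE pass over fixture
-- instead of A's pass per group-stage result; both mutate `fixture` in place in Python and
-- return it, and the theorems below are about that returned value.

-- `d[k] = v` on the association-list encoding of a Python dict (overwrite in place, new keys append)
def pvSetItem (m : List (String × String)) (k v : String) : List (String × String) :=
  if m.any (fun e => e.1 == k) then m.map (fun e => if e.1 == k then (e.1, v) else e)
  else m ++ [(k, v)]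

-- ===== PORT A =====
-- body of A's innermost loop: team_group, position = team[0], int(team[1]); conditional write
def aTeamStep (g : String) (ts : List String) (m : List (String × String)) (team : String) :
    List (String × String) :=
  match PySem.Str.pyGet? team 0, PySem.Str.pyGet? team 1 with
  | some c0, some c1 =>
    match PySem.Int.ofStr? (String.ofList [c1]) with
    | some p =>
      if String.ofList [c0] == g then
        match PySem.List.pyGet? ts (p - 1) with
        | some w => pvSetItem m (String.ofList [c0] ++ PySem.Int.toStr p) w
        | none => m        -- IndexError (outside Pre_)
      else m
    | none => m            -- ValueError (outside Pre_)
  | _, _ => m              -- IndexError (outside Pre_)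

-- 'for team in match.keys()' (keys are unchanged by the writes admitted by Pre_)
def aGame (g : String) (ts : List String) (m : List (String × String)) : List (String × String) :=
  (m.map Prod.fst).foldl (aTeamStep g ts) m

def round_16_populate (fixture : List (String × List (String × String))) (group_stage_results : List (String × List String)) : List (String × List (String × String)) :=
  group_stage_results.foldl
    (fun fx r => fx.map (fun gm => (gm.1, aGame r.1 r.2 gm.2))) fixture

-- ===== PORT B =====
-- index = {}; for group, through_teams in group_stage_results: index[group] = through_teams
def pvIndex (gsr : List (String × List String)) : PySem.Dict String (List String) :=
  gsr.foldl (fun d r => d.insert r.1 r.2) PySem.Dict.empty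

-- body of B's inner loop: group = team[0]; if group in index: position = int(team[1]); write
def bTeamStep (idx : PySem.Dict String (List String)) (m : List (String × String)) (team : String) :
    List (String × String) :=
  match PySem.Str.pyGet? team 0 with
  | some c0 =>
    match idx.get? (String.ofList [c0]) with
    | some ts =>
      match PySem.Str.pyGet? team 1 with
      | some c1 =>
        match PySem.Int.ofStr? (String.ofList [c1]) with
        | some p =>
          match PySem.List.pyGet? ts (p - 1) with
          | some w => pvSetItem m (String.ofList [c0] ++ PySem.Int.toStr p) w
          | none => m      -- IndexError (outside Pre_)
        | none => m        -- ValueError (outside Pre_)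
      | none => m          -- IndexError (outside Pre_)
    | none => m            -- group not in index: no write
  | none => m              -- IndexError (outside Pre_)

def round_16_populate_alt (fixture : List (String × List (String × String))) (group_stage_results : List (String × List String)) : List (String × List (String × String)) :=
  let idx := pvIndex group_stage_results
  fixture.map (fun gm => (gm.1, (gm.2.map Prod.fst).foldl (bTeamStep idx) gm.2))

-- ===== PRECONDITION & SPEC =====
-- shape of a team key "G<digit>…": its group string, its position, the key actually written
def pvGrp (t : String) : String :=
  match t.toList with | c0 :: _ => String.ofList [c0] | [] => ""
def pvPos (t : String) : Int :=
  match t.toList with | _ :: c1 :: _ => (c1.toNat : Int) - 48 | _ => 0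
def pvWKey (t : String) : String :=
  match t.toList with | c0 :: c1 :: _ => String.ofList [c0, c1] | _ => ""
def pvWFb (t : String) : Bool :=
  match t.toList with | _ :: c1 :: _ => decide ('0' ≤ c1 ∧ c1 ≤ '9') | _ => false

-- a team key A can process without raising: two+ chars with a digit second char, and for every
-- matching group-stage result the written key exists and the indexed position is in range
def pvTeamOKb (gsr : List (String × List String)) (K : List String) (t : String) : Bool :=
  pvWFb t &&
    gsr.all (fun r =>
      (r.1 != pvGrp t) ||
        (K.contains (pvWKey t) && (PySem.List.pyGet? r.2 (pvPos t - 1)).isSome))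

-- Pre_ excludes the inputs on which A raises — with nonempty results: a team key shorter than
-- 2 chars or with a non-digit second char (IndexError/ValueError), a matching result whose
-- through_teams list is too short (IndexError), or a write to a key absent from its match
-- (RuntimeError) — and, with empty results, the empty-string team keys, on which A returns the
-- fixture untouched but B itself raises IndexError reading team[0].
def Pre_round_16_populate (fixture : List (String × List (String × String))) (group_stage_results : List (String × List String)) : Prop :=
  (group_stage_results = [] ∧
    (fixture.all (fun gm => gm.2.all (fun e => !(e.1 == "")))) = true) ∨
    (fixture.all (fun gm =>
      gm.2.all (fun e => pvTeamOKb group_stage_results (gm.2.map Prod.fst) e.1))) = true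

instance (fixture : List (String × List (String × String))) (group_stage_results : List (String × List String)) : Decidable (Pre_round_16_populate fixture group_stage_results) := by
  unfold Pre_round_16_populate; infer_instance

def pvWitness_round_16_populate : (List (String × List (String × String))) × (List (String × List String)) :=
  ([("g1", [("A1", "winner A"), ("B2", "runner-up B")])], [("A", ["ARG", "KSA"]), ("B", ["FRA", "DEN"])])

def Spec_round_16_populate (fixture : List (String × List (String × String))) (group_stage_results : List (String × List String)) (out : List (String × List (String × String))) : Prop := out = round_16_populate_alt fixture group_stage_results
instance (fixture : List (String × List (String × String))) (group_stage_results : List (String × List String)) (out : List (String × List (String × String))) : Decidable (Spec_round_16_populate fixture group_stage_results out) := by unfold Spec_round_16_populate; infer_instance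

-- ===== CLAIM (what is proved, stated in full; the proofs are below) =====
def Claim_equal_round_16_populate : Prop := ∀ (fixture : List (String × List (String × String))) (group_stage_results : List (String × List String)), Dom_round_16_populate fixture group_stage_results → Pre_round_16_populate fixture group_stage_results → Spec_round_16_populate fixture group_stage_results (round_16_populate fixture group_stage_results)

-- ===== LEMMAS AND PROOFS =====

-- did some (well-formed) team of the snapshot K write to key k?
def pvHit (K : List String) (k : String) : Bool :=
  K.any (fun t => pvWFb t && (pvWKey t == k))

-- the value the index writes to key k (k = "G<digit>")
def pvIdxVal (idx : PySem.Dict String (List String)) (k v : String) : String :=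
  (PySem.List.pyGet? (idx.getD (pvGrp k) []) (pvPos k - 1)).getD v

-- ---- character facts ----
theorem pv_digit_cases (c : Char) (h0 : '0' ≤ c) (h9 : c ≤ '9') :
    c = '0' ∨ c = '1' ∨ c = '2' ∨ c = '3' ∨ c = '4' ∨ c = '5' ∨ c = '6' ∨ c = '7' ∨ c = '8' ∨ c = '9' := by
  have h0' : ('0').toNat ≤ c.toNat := Char.le_def.mp h0
  have h9' : c.toNat ≤ ('9').toNat := Char.le_def.mp h9
  have e0 : ('0').toNat = 48 := rfl
  have e9 : ('9').toNat = 57 := rfl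
  have hc : ∀ n : Nat, c.toNat = n → c = Char.ofNat n := by
    intro n hn; subst hn; exact (Char.ofNat_toNat c).symm
  have : c.toNat = 48 ∨ c.toNat = 49 ∨ c.toNat = 50 ∨ c.toNat = 51 ∨ c.toNat = 52 ∨ c.toNat = 53 ∨ c.toNat = 54 ∨ c.toNat = 55 ∨ c.toNat = 56 ∨ c.toNat = 57 := by omega
  rcases this with h|h|h|h|h|h|h|h|h|h <;> simp [hc _ h]

theorem pv_digit_ofStr (c : Char) (h0 : '0' ≤ c) (h9 : c ≤ '9') :
    PySem.Int.ofStr? (String.ofList [c]) = some ((c.toNat : Int) - 48) := by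
  rcases pv_digit_cases c h0 h9 with h|h|h|h|h|h|h|h|h|h <;> subst h <;> decide

theorem pv_digit_toStr (c : Char) (h0 : '0' ≤ c) (h9 : c ≤ '9') :
    PySem.Int.toStr ((c.toNat : Int) - 48) = String.ofList [c] := by
  rcases pv_digit_cases c h0 h9 with h|h|h|h|h|h|h|h|h|h <;> subst h <;> decide

theorem pv_wkey_append (c0 c1 : Char) (h0 : '0' ≤ c1) (h9 : c1 ≤ '9') :
    String.ofList [c0] ++ PySem.Int.toStr ((c1.toNat : Int) - 48) = String.ofList [c0, c1] := by
  rw [pv_digit_toStr c1 h0 h9, ← String.ofList_append]; rfl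

-- ---- shape facts ----
theorem pvWFb_shape (t : String) (h : pvWFb t = true) :
    ∃ c0 c1 rest, t.toList = c0 :: c1 :: rest ∧ '0' ≤ c1 ∧ c1 ≤ '9' := by
  unfold pvWFb at h
  cases ht : t.toList with
  | nil => rw [ht] at h; simp at h
  | cons c0 tl =>
    cases tl with
    | nil => rw [ht] at h; simp at h
    | cons c1 rest =>
      rw [ht] at h; simp at h
      exact ⟨c0, c1, rest, rfl, h.1, h.2⟩

theorem pvGrp_of_shape (t : String) (c0 c1 : Char) (rest : List Char)
    (ht : t.toList = c0 :: c1 :: rest) : pvGrp t = String.ofList [c0] := by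
  unfold pvGrp; rw [ht]

theorem pvPos_of_shape (t : String) (c0 c1 : Char) (rest : List Char)
    (ht : t.toList = c0 :: c1 :: rest) : pvPos t = (c1.toNat : Int) - 48 := by
  unfold pvPos; rw [ht]

theorem pvWKey_of_shape (t : String) (c0 c1 : Char) (rest : List Char)
    (ht : t.toList = c0 :: c1 :: rest) : pvWKey t = String.ofList [c0, c1] := by
  unfold pvWKey; rw [ht]

theorem pv_wkey_grp (t : String) (h : pvWFb t = true) : pvGrp (pvWKey t) = pvGrp t := by
  obtain ⟨c0, c1, rest, ht, _, _⟩ := pvWFb_shape t h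
  rw [pvWKey_of_shape t c0 c1 rest ht, pvGrp_of_shape t c0 c1 rest ht]
  unfold pvGrp; simp

theorem pv_wkey_pos (t : String) (h : pvWFb t = true) : pvPos (pvWKey t) = pvPos t := by
  obtain ⟨c0, c1, rest, ht, _, _⟩ := pvWFb_shape t h
  rw [pvWKey_of_shape t c0 c1 rest ht, pvPos_of_shape t c0 c1 rest ht]
  unfold pvPos; simp

-- ---- pvSetItem ----
theorem pvSetItem_mem (m : List (String × String)) (k v : String) (h : k ∈ m.map Prod.fst) :
    pvSetItem m k v = m.map (fun e => if e.1 == k then (e.1, v) else e) := by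
  unfold pvSetItem
  have : m.any (fun e => e.1 == k) = true := by
    simp only [List.mem_map] at h
    obtain ⟨e, he, hek⟩ := h
    simp only [List.any_eq_true]
    exact ⟨e, he, by simp [hek]⟩
  rw [this]; simp

-- a map that keeps first components fixed keeps the key snapshot fixed
theorem pv_map_fst (m : List (String × String)) (F : String × String → String) :
    (m.map (fun e => (e.1, F e))).map Prod.fst = m.map Prod.fst := by
  simp [List.map_map]

-- ---- the two per-team steps on a well-formed team ----
theorem aTeamStep_eq (g : String) (ts : List String) (m : List (String × String)) (t : String)
    (hwf : pvWFb t = true)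
    (hok : pvGrp t = g → pvWKey t ∈ m.map Prod.fst ∧ (PySem.List.pyGet? ts (pvPos t - 1)).isSome = true) :
    aTeamStep g ts m t =
      m.map (fun e =>
        (e.1, if pvWFb t && (pvGrp t == g) && (pvWKey t == e.1)
              then (PySem.List.pyGet? ts (pvPos t - 1)).getD e.2 else e.2)) := by
  obtain ⟨c0, c1, rest, ht, h0, h9⟩ := pvWFb_shape t hwf
  have hg0 : PySem.Str.pyGet? t 0 = some c0 := by
    have := PySem.Str.pyGet?_natCast t 0; rw [ht] at this; simpa using this
  have hg1 : PySem.Str.pyGet? t 1 = some c1 := by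
    have := PySem.Str.pyGet?_natCast t 1; rw [ht] at this; simpa using this
  have hgrp := pvGrp_of_shape t c0 c1 rest ht
  have hpos := pvPos_of_shape t c0 c1 rest ht
  have hwk := pvWKey_of_shape t c0 c1 rest ht
  unfold aTeamStep
  rw [hg0, hg1]; dsimp only; rw [pv_digit_ofStr c1 h0 h9]
  by_cases hg : String.ofList [c0] = g
  · have hbeq : (String.ofList [c0] == g) = true := by simp [hg]
    obtain ⟨hmem, hsome⟩ := hok (by rw [hgrp]; exact hg)
    obtain ⟨w, hw⟩ := Option.isSome_iff_exists.mp hsome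
    have harr : ((c1.toNat : Int) - 48 - 1) = pvPos t - 1 := by rw [hpos]
    have hkey : String.ofList [c0] ++ PySem.Int.toStr ((c1.toNat : Int) - 48) = pvWKey t := by
      rw [pv_wkey_append c0 c1 h0 h9, hwk]
    simp only [hbeq, if_true, harr, hkey, hw]
    rw [pvSetItem_mem m (pvWKey t) w hmem]
    apply List.map_congr_left
    intro e he
    have hc : (pvGrp t == g) = true := by simp [hgrp, hg]
    simp only [hwf, hc, Bool.true_and]
    by_cases hk : e.1 = pvWKey t
    · simp [hk]
    · simp [hk, Ne.symm hk]
  · have hbeq : (String.ofList [c0] == g) = false := by simp [hg]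
    have hc : (pvGrp t == g) = false := by simp [hgrp, hg]
    simp [hbeq, hc]

theorem bTeamStep_eq (idx : PySem.Dict String (List String)) (m : List (String × String))
    (t : String) (hwf : pvWFb t = true)
    (hok : idx.contains (pvGrp t) = true →
      pvWKey t ∈ m.map Prod.fst ∧
        (PySem.List.pyGet? (idx.getD (pvGrp t) []) (pvPos t - 1)).isSome = true) :
    bTeamStep idx m t =
      m.map (fun e =>
        (e.1, if pvWFb t && idx.contains (pvGrp t) && (pvWKey t == e.1)
              then (PySem.List.pyGet? (idx.getD (pvGrp t) []) (pvPos t - 1)).getD e.2 else e.2)) := by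
  obtain ⟨c0, c1, rest, ht, h0, h9⟩ := pvWFb_shape t hwf
  have hg0 : PySem.Str.pyGet? t 0 = some c0 := by
    have := PySem.Str.pyGet?_natCast t 0; rw [ht] at this; simpa using this
  have hg1 : PySem.Str.pyGet? t 1 = some c1 := by
    have := PySem.Str.pyGet?_natCast t 1; rw [ht] at this; simpa using this
  have hgrp := pvGrp_of_shape t c0 c1 rest ht
  have hpos := pvPos_of_shape t c0 c1 rest ht
  have hwk := pvWKey_of_shape t c0 c1 rest ht
  unfold bTeamStep
  rw [hg0]; dsimp only
  cases hq : idx.get? (String.ofList [c0]) with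
  | none =>
    have hcon : idx.contains (pvGrp t) = false := by
      rw [hgrp, PySem.Dict.contains_eq_isSome_get?, hq]; rfl
    simp [hcon]
  | some ts =>
    have hcon : idx.contains (pvGrp t) = true := by
      rw [hgrp, PySem.Dict.contains_eq_isSome_get?, hq]; rfl
    have hgd : idx.getD (pvGrp t) [] = ts := by
      rw [hgrp, PySem.Dict.getD_eq_get?_getD, hq]; rfl
    rw [hg1]; dsimp only
    rw [pv_digit_ofStr c1 h0 h9]
    obtain ⟨hmem, hsome⟩ := hok hcon
    obtain ⟨w, hw⟩ := Option.isSome_iff_exists.mp hsome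
    rw [hgd] at hw
    have harr : ((c1.toNat : Int) - 48 - 1) = pvPos t - 1 := by rw [hpos]
    have hkey : String.ofList [c0] ++ PySem.Int.toStr ((c1.toNat : Int) - 48) = pvWKey t := by
      rw [pv_wkey_append c0 c1 h0 h9, hwk]
    simp only [harr, hkey, hw]
    rw [pvSetItem_mem m (pvWKey t) w hmem]
    apply List.map_congr_left
    intro e he
    simp only [hwf, hcon, Bool.true_and, hgd, hw]
    by_cases hk : e.1 = pvWKey t
    · simp [hk]
    · simp [hk, Ne.symm hk]

theorem pvHit_cons (t : String) (T : List String) (k : String) :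
    pvHit (t :: T) k = ((pvWFb t && (pvWKey t == k)) || pvHit T k) := by
  simp [pvHit]

theorem pvHit_some (T : List String) (k : String) (h : pvHit T k = true) :
    ∃ t ∈ T, pvWFb t = true ∧ pvWKey t = k := by
  simp only [pvHit, List.any_eq_true, Bool.and_eq_true, beq_iff_eq] at h
  exact h

theorem pv_wkey_eq (t k : String) (hwf : pvWFb t = true) (hk : pvWKey t = k) :
    pvGrp k = pvGrp t ∧ pvPos k = pvPos t := by
  rw [← hk]; exact ⟨pv_wkey_grp t hwf, pv_wkey_pos t hwf⟩

theorem aFoldT_eq (g : String) (ts : List String) :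
    ∀ (T : List String) (m : List (String × String)),
      (∀ t ∈ T, pvWFb t = true ∧
        (pvGrp t = g → pvWKey t ∈ m.map Prod.fst ∧
          (PySem.List.pyGet? ts (pvPos t - 1)).isSome = true)) →
      T.foldl (aTeamStep g ts) m =
        m.map (fun e =>
          (e.1, if pvHit T e.1 && (pvGrp e.1 == g)
                then (PySem.List.pyGet? ts (pvPos e.1 - 1)).getD e.2 else e.2)) := by
  intro T
  induction T with
  | nil => intro m _; simp [pvHit]
  | cons t T ih =>
    intro m H
    obtain ⟨hwf, hokt⟩ := H t (List.mem_cons_self ..)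
    rw [List.foldl_cons, aTeamStep_eq g ts m t hwf hokt]
    rw [ih _ (by
      intro t' ht'
      obtain ⟨hwf', hok'⟩ := H t' (List.mem_cons_of_mem _ ht')
      refine ⟨hwf', fun hg => ?_⟩
      obtain ⟨hmem', hsome'⟩ := hok' hg
      exact ⟨by rwa [pv_map_fst], hsome'⟩)]
    rw [List.map_map]
    apply List.map_congr_left
    intro e he
    simp only [Function.comp_apply, pvHit_cons]
    by_cases h1 : pvHit T e.1 = true
    · by_cases h2 : pvGrp e.1 = g
      · -- the index value is defined here: both sides return it
        obtain ⟨t', ht', hwf', hk'⟩ := pvHit_some T e.1 h1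
        obtain ⟨hgrp', hpos'⟩ := pv_wkey_eq t' e.1 hwf' hk'
        obtain ⟨_, hsome⟩ := (H t' (List.mem_cons_of_mem _ ht')).2 (by rw [← hgrp', h2])
        obtain ⟨w, hw⟩ := Option.isSome_iff_exists.mp hsome
        rw [← hpos'] at hw
        simp [h1, h2, hw]
      · have h2' : (pvGrp e.1 == g) = false := by simp [h2]
        simp only [h1, h2', Bool.and_false, Bool.or_true]
        by_cases h3 : pvWKey t = e.1
        · have : (pvGrp t == g) = false := by
            obtain ⟨hg', _⟩ := pv_wkey_eq t e.1 hwf h3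
            rw [← hg']; simp [h2]
          simp [this]
        · simp [h3]
    · have h1' : pvHit T e.1 = false := by simpa using h1
      simp only [h1', Bool.or_false]
      by_cases h3 : pvWKey t = e.1
      · obtain ⟨hg', hp'⟩ := pv_wkey_eq t e.1 hwf h3
        simp [hwf, h3, hg', hp']
      · simp [hwf, h3]

theorem bFoldT_eq (idx : PySem.Dict String (List String)) :
    ∀ (T : List String) (m : List (String × String)),
      (∀ t ∈ T, pvWFb t = true ∧
        (idx.contains (pvGrp t) = true → pvWKey t ∈ m.map Prod.fst ∧
          (PySem.List.pyGet? (idx.getD (pvGrp t) []) (pvPos t - 1)).isSome = true)) →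
      T.foldl (bTeamStep idx) m =
        m.map (fun e =>
          (e.1, if pvHit T e.1 && idx.contains (pvGrp e.1)
                then (PySem.List.pyGet? (idx.getD (pvGrp e.1) []) (pvPos e.1 - 1)).getD e.2
                else e.2)) := by
  intro T
  induction T with
  | nil => intro m _; simp [pvHit]
  | cons t T ih =>
    intro m H
    obtain ⟨hwf, hokt⟩ := H t (List.mem_cons_self ..)
    rw [List.foldl_cons, bTeamStep_eq idx m t hwf hokt]
    rw [ih _ (by
      intro t' ht'
      obtain ⟨hwf', hok'⟩ := H t' (List.mem_cons_of_mem _ ht')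
      refine ⟨hwf', fun hg => ?_⟩
      obtain ⟨hmem', hsome'⟩ := hok' hg
      exact ⟨by rwa [pv_map_fst], hsome'⟩)]
    rw [List.map_map]
    apply List.map_congr_left
    intro e he
    simp only [Function.comp_apply, pvHit_cons]
    by_cases h1 : pvHit T e.1 = true
    · by_cases h2 : idx.contains (pvGrp e.1) = true
      · obtain ⟨t', ht', hwf', hk'⟩ := pvHit_some T e.1 h1
        obtain ⟨hgrp', hpos'⟩ := pv_wkey_eq t' e.1 hwf' hk'
        obtain ⟨_, hsome⟩ := (H t' (List.mem_cons_of_mem _ ht')).2 (by rw [← hgrp']; exact h2)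
        obtain ⟨w, hw⟩ := Option.isSome_iff_exists.mp hsome
        rw [← hpos', ← hgrp'] at hw
        simp [h1, h2, hw]
      · have h2' : idx.contains (pvGrp e.1) = false := by simpa using h2
        simp only [h1, h2', Bool.and_false, Bool.or_true]
        by_cases h3 : pvWKey t = e.1
        · have : idx.contains (pvGrp t) = false := by
            obtain ⟨hg', _⟩ := pv_wkey_eq t e.1 hwf h3
            rw [← hg']; exact h2'
          simp [this]
        · simp [h3]
    · have h1' : pvHit T e.1 = false := by simpa using h1
      simp only [h1', Bool.or_false]
      by_cases h3 : pvWKey t = e.1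
      · obtain ⟨hg', hp'⟩ := pv_wkey_eq t e.1 hwf h3
        simp [hwf, h3, hg', hp']
      · simp [hwf, h3]

theorem aAll_eq :
    ∀ (gsr : List (String × List String)) (K : List String) (m : List (String × String)),
      m.map Prod.fst = K →
      (∀ t ∈ K, pvWFb t = true ∧
        ∀ r ∈ gsr, r.1 = pvGrp t → (pvWKey t ∈ K ∧
          (PySem.List.pyGet? r.2 (pvPos t - 1)).isSome = true)) →
      gsr.foldl (fun m r => aGame r.1 r.2 m) m =
        m.map (fun e =>
          (e.1, gsr.foldl (fun v r =>
              if pvHit K e.1 && (pvGrp e.1 == r.1)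
              then (PySem.List.pyGet? r.2 (pvPos e.1 - 1)).getD v else v) e.2)) := by
  intro gsr
  induction gsr with
  | nil => intro K m _ _; simp
  | cons r gsr ih =>
    intro K m hK H
    rw [List.foldl_cons]
    have hgame : aGame r.1 r.2 m =
        m.map (fun e =>
          (e.1, if pvHit K e.1 && (pvGrp e.1 == r.1)
                then (PySem.List.pyGet? r.2 (pvPos e.1 - 1)).getD e.2 else e.2)) := by
      unfold aGame
      rw [hK]
      apply aFoldT_eq
      intro t ht
      obtain ⟨hwf, hok⟩ := H t ht
      refine ⟨hwf, fun hg => ?_⟩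
      obtain ⟨hmem, hsome⟩ := hok r (List.mem_cons_self ..) hg.symm
      exact ⟨by rwa [hK], hsome⟩
    rw [hgame]
    rw [ih K _ ((pv_map_fst m _).trans hK) (by
      intro t ht
      obtain ⟨hwf, hok⟩ := H t ht
      exact ⟨hwf, fun r' hr' => hok r' (List.mem_cons_of_mem _ hr')⟩)]
    rw [List.map_map]
    rfl

theorem pvIndex_append (gsr : List (String × List String)) (r : String × List String) :
    pvIndex (gsr ++ [r]) = (pvIndex gsr).insert r.1 r.2 := by
  unfold pvIndex; rw [List.foldl_append]; rfl

theorem pvIndex_mem (gsr : List (String × List String)) (g : String) (ts : List String)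
    (h : (pvIndex gsr).get? g = some ts) : (g, ts) ∈ gsr := by
  induction gsr using List.reverseRecOn with
  | nil => simp [pvIndex, PySem.Dict.get?_empty] at h
  | append_singleton gsr r ih =>
    rw [pvIndex_append, PySem.Dict.get?_insert] at h
    by_cases hg : g = r.1
    · rw [if_pos hg] at h
      have hv : r.2 = ts := by injection h
      subst hv; subst hg
      exact List.mem_append_right _ (by simp)
    · rw [if_neg hg] at h
      exact List.mem_append_left _ (ih h)

theorem pvFoldVal_eq (k : String) (gsr : List (String × List String)) (v0 : String)
    (H : ∀ r ∈ gsr, r.1 = pvGrp k → (PySem.List.pyGet? r.2 (pvPos k - 1)).isSome = true) :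
    gsr.foldl (fun v r =>
        if pvGrp k == r.1 then (PySem.List.pyGet? r.2 (pvPos k - 1)).getD v else v) v0
      = if (pvIndex gsr).contains (pvGrp k) then pvIdxVal (pvIndex gsr) k v0 else v0 := by
  induction gsr using List.reverseRecOn with
  | nil => simp [pvIndex, PySem.Dict.contains_empty]
  | append_singleton gsr r ih =>
    rw [List.foldl_append, List.foldl_cons, List.foldl_nil, pvIndex_append]
    have ih' := ih (fun r' hr' => H r' (List.mem_append_left _ hr'))
    by_cases hgr : pvGrp k = r.1
    · have hb : (pvGrp k == r.1) = true := by simp [hgr]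
      rw [hb]
      have hsome := H r (List.mem_append_right _ (by simp)) hgr.symm
      obtain ⟨w, hw⟩ := Option.isSome_iff_exists.mp hsome
      have hcon : ((pvIndex gsr).insert r.1 r.2).contains (pvGrp k) = true := by
        rw [hgr]; exact PySem.Dict.contains_insert_self ..
      have hgd : ((pvIndex gsr).insert r.1 r.2).getD (pvGrp k) [] = r.2 := by
        rw [PySem.Dict.getD_insert, if_pos hgr]
      rw [if_pos hcon]
      unfold pvIdxVal
      rw [hgd, hw]
      simp
    · have hb : (pvGrp k == r.1) = false := by simp [hgr]
      rw [hb]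
      simp only [Bool.false_eq_true, if_false]
      have hcon : ((pvIndex gsr).insert r.1 r.2).contains (pvGrp k)
          = (pvIndex gsr).contains (pvGrp k) := by
        rw [PySem.Dict.contains_insert]
        simp [hgr]
      have hgd : ((pvIndex gsr).insert r.1 r.2).getD (pvGrp k) []
          = (pvIndex gsr).getD (pvGrp k) [] := by
        rw [PySem.Dict.getD_insert, if_neg hgr]
      rw [hcon]
      unfold pvIdxVal
      rw [hgd]
      exact ih'

theorem pvBFold_empty (T : List String) (m : List (String × String)) :
    T.foldl (bTeamStep PySem.Dict.empty) m = m := by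
  have h : ∀ (acc : List (String × String)) (t : String), t ∈ T →
      bTeamStep PySem.Dict.empty acc t = acc := by
    intro acc t _
    unfold bTeamStep
    cases PySem.Str.pyGet? t 0 with
    | none => rfl
    | some c0 => dsimp only; rw [PySem.Dict.get?_empty]
  exact (PySem.List.foldl_congr_mem T (bTeamStep PySem.Dict.empty) (fun acc _ => acc) m h).trans
    (PySem.List.foldl_ignore ..)

theorem pvASwap (gsr : List (String × List String)) :
    ∀ (fx : List (String × List (String × String))),
      gsr.foldl (fun fx r => fx.map (fun gm => (gm.1, aGame r.1 r.2 gm.2))) fx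
        = fx.map (fun gm => (gm.1, gsr.foldl (fun m r => aGame r.1 r.2 m) gm.2)) := by
  induction gsr with
  | nil => intro fx; simp
  | cons r gsr ih =>
    intro fx
    rw [List.foldl_cons, ih, List.map_map]
    rfl

theorem pvTeamOKb_iff (gsr : List (String × List String)) (K : List String) (t : String) :
    pvTeamOKb gsr K t = true ↔
      (pvWFb t = true ∧ ∀ r ∈ gsr, r.1 = pvGrp t →
        (pvWKey t ∈ K ∧ (PySem.List.pyGet? r.2 (pvPos t - 1)).isSome = true)) := by
  simp [pvTeamOKb, List.all_eq_true, Bool.or_eq_true, Bool.and_eq_true, bne_iff_ne, ne_eq,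
    or_iff_not_imp_left]

theorem round_16_populate_spec : Claim_equal_round_16_populate := by
  unfold Claim_equal_round_16_populate
  intro fixture gsr hDom hPre
  unfold Spec_round_16_populate
  rcases hPre with ⟨hnil, _⟩ | hall
  · subst hnil
    unfold round_16_populate round_16_populate_alt
    rw [List.foldl_nil]
    have : pvIndex ([] : List (String × List String)) = PySem.Dict.empty := rfl
    simp only [this, pvBFold_empty]
    simp
  · unfold round_16_populate round_16_populate_alt
    rw [pvASwap]
    apply List.map_congr_left
    intro gm hgm
    simp only [List.all_eq_true] at hall
    have hK : ∀ t ∈ gm.2.map Prod.fst, pvWFb t = true ∧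
        ∀ r ∈ gsr, r.1 = pvGrp t → (pvWKey t ∈ gm.2.map Prod.fst ∧
          (PySem.List.pyGet? r.2 (pvPos t - 1)).isSome = true) := by
      intro t ht
      obtain ⟨e, he, het⟩ := List.mem_map.mp ht
      have := (pvTeamOKb_iff gsr (gm.2.map Prod.fst) e.1).mp (hall gm hgm e he)
      rwa [het] at this
    rw [aAll_eq gsr (gm.2.map Prod.fst) gm.2 rfl hK]
    have hKB : ∀ t ∈ gm.2.map Prod.fst, pvWFb t = true ∧
        ((pvIndex gsr).contains (pvGrp t) = true → pvWKey t ∈ gm.2.map Prod.fst ∧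
          (PySem.List.pyGet? ((pvIndex gsr).getD (pvGrp t) []) (pvPos t - 1)).isSome = true) := by
      intro t ht
      refine ⟨(hK t ht).1, fun hcon => ?_⟩
      rw [PySem.Dict.contains_eq_isSome_get?] at hcon
      obtain ⟨ts, hts⟩ := Option.isSome_iff_exists.mp hcon
      have hmem := pvIndex_mem gsr (pvGrp t) ts hts
      have hgd : (pvIndex gsr).getD (pvGrp t) [] = ts := by
        rw [PySem.Dict.getD_eq_get?_getD, hts]; rfl
      rw [hgd]
      exact (hK t ht).2 (pvGrp t, ts) hmem rfl
    rw [bFoldT_eq (pvIndex gsr) (gm.2.map Prod.fst) gm.2 hKB]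
    refine congrArg (fun z => (gm.1, z)) ?_
    apply List.map_congr_left
    intro e he
    refine congrArg (fun z => (e.1, z)) ?_
    by_cases hHit : pvHit (gm.2.map Prod.fst) e.1 = true
    · have hfun : (fun (v : String) (r : String × List String) =>
          if pvHit (gm.2.map Prod.fst) e.1 && (pvGrp e.1 == r.1)
          then (PySem.List.pyGet? r.2 (pvPos e.1 - 1)).getD v else v)
          = (fun v r => if pvGrp e.1 == r.1
              then (PySem.List.pyGet? r.2 (pvPos e.1 - 1)).getD v else v) := by
        funext v r; rw [hHit, Bool.true_and]
      rw [hfun, pvFoldVal_eq e.1 gsr e.2 (by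
        intro r hr hgr
        exact (hK e.1 (List.mem_map.mpr ⟨e, he, rfl⟩)).2 r hr hgr |>.2)]
      rw [hHit, Bool.true_and]
      rfl
    · have hHit' : pvHit (gm.2.map Prod.fst) e.1 = false := by simpa using hHit
      have hfun : (fun (v : String) (r : String × List String) =>
          if pvHit (gm.2.map Prod.fst) e.1 && (pvGrp e.1 == r.1)
          then (PySem.List.pyGet? r.2 (pvPos e.1 - 1)).getD v else v)
          = (fun v _ => v) := by
        funext v r; rw [hHit', Bool.false_and]; rfl
      rw [hfun, PySem.List.foldl_ignore, hHit', Bool.false_and]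
      rfl
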